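-- pv_equiv track=rewrite | github.com/Khadeer-Bin-kashif/Odyssey_Tacticians_DSA | plotter.py | dist_matrix_creator
-- ===== SOURCE A (Python) =====
-- def dist_matrix_creator(graph):
--   cities = list(graph.keys())
--   num_cities = len(cities)
--   dist_matrix = [[None for _ in range(num_cities)] for _ in range(num_cities)]
--   index_dict = {}
--
--   for i, city in enumerate(cities):
--     for j, neighbor_city in enumerate(cities):
--       if city == neighbor_city:
--         dist_matrix[i][j] = 0
--       else:
--         for destination, distance in graph[city]:
--           if destination == neighbor_city:
--             dist_matrix[i][j] = distance
--             break
--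
--   for i in range(num_cities):
--     index_dict[i] = cities[i]
--
--   return dist_matrix, index_dict
-- ===== SOURCE B (Python) =====
-- def dist_matrix_creator(graph):
--   cities = list(graph.keys())
--   n = len(cities)
--   idx = {city: i for i, city in enumerate(cities)}
--   dist_matrix = []
--   for i, city in enumerate(cities):
--     row = [None] * n
--     row[i] = 0
--     assigned = {i}
--     for destination, distance in graph[city]:
--       j = idx.get(destination)
--       if j is not None and j not in assigned:
--         row[j] = distance
--         assigned.add(j)
--     dist_matrix.append(row)
--   index_dict = dict(enumerate(cities))
--   return dist_matrix, index_dict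
-- ===== Notes on version B (the rewrite author's own statement) =====
-- stated objective: faster
-- what changed: Replaces A's all-pairs loop with an inner linear scan of graph[city] per cell (O(n^2*e)) by one edge-driven pass per city over an index map, writing each first-seen edge directly into a preallocated row and tracking assigned cells in a set.
import Mathlib
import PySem

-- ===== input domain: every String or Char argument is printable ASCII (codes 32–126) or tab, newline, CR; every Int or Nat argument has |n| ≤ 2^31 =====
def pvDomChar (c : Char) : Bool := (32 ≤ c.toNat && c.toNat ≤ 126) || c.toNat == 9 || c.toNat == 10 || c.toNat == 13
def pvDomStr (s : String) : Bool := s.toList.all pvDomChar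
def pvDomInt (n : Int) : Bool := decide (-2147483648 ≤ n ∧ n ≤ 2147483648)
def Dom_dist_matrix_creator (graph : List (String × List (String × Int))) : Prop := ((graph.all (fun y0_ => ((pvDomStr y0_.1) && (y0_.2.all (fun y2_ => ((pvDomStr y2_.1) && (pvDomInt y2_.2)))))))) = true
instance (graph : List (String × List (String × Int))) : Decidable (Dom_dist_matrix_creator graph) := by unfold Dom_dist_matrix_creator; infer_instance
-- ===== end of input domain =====

-- B replaces A's all-pairs loops (inner scan of graph[city] per cell) by one edge-driven
-- pass per city over an index map into a preallocated row (objective: faster).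

-- ===== PORT A =====
-- inner 'for destination, distance in graph[city]: if destination == neighbor_city: …; break'
def pvAScan (edges : List (String × Int)) (nb : String) (cur : Option Int) : Option Int :=
  match edges with
  | [] => cur
  | (dest, dist) :: rest => if dest == nb then some dist else pvAScan rest nb cur

def dist_matrix_creator (graph : List (String × List (String × Int))) : List (List (Option Int)) × (List (Int × String)) :=
  let d := PySem.Dict.ofList graph
  let cities := d.keys
  let num_cities := cities.length
  -- the nested i/j loops: each cell (i, j) is written exactly by its branch
  let dist_matrix := cities.map (fun city =>
    cities.map (fun neighbor_city =>
      if city == neighbor_city then some (0 : Int)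
      else pvAScan (d.getD city []) neighbor_city none))
  -- for i in range(num_cities): index_dict[i] = cities[i]
  let index_dict := (PySem.List.pyRange 0 (num_cities : Int) 1).foldl
      (fun acc i => acc.insert i (PySem.List.pyGetD cities i "")) PySem.Dict.empty
  (dist_matrix, index_dict.items)

-- ===== PORT B =====
-- the per-row edge loop: j = idx.get(destination); if j is not None and j not in assigned: row[j] = distance
def pvBRow (idx : PySem.Dict String Int) (edges : List (String × Int))
    (row : List (Option Int)) (assigned : PySem.Set Int) : List (Option Int) :=
  match edges with
  | [] => row
  | (dest, dist) :: rest =>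
    match idx.get? dest with
    | none => pvBRow idx rest row assigned
    | some j =>
      if PySem.Set.contains assigned j then pvBRow idx rest row assigned
      else pvBRow idx rest (PySem.List.pySetD row j (some dist)) (PySem.Set.add assigned j)

def dist_matrix_creator_alt (graph : List (String × List (String × Int))) : List (List (Option Int)) × (List (Int × String)) :=
  let d := PySem.Dict.ofList graph
  let cities := d.keys
  let n := cities.length
  -- idx = {city: i for i, city in enumerate(cities)}
  let idx := (PySem.List.enumerate cities).foldl (fun acc p => acc.insert p.2 p.1) PySem.Dict.empty
  let dist_matrix := (PySem.List.enumerate cities).map (fun p =>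
    pvBRow idx (d.getD p.2 [])
      (PySem.List.pySetD (List.replicate n (none : Option Int)) p.1 (some 0))
      (PySem.Set.add PySem.Set.empty p.1))
  -- index_dict = dict(enumerate(cities))
  let index_dict := (PySem.List.enumerate cities).foldl (fun acc p => acc.insert p.1 p.2) PySem.Dict.empty
  (dist_matrix, index_dict.items)

-- ===== PRECONDITION & SPEC =====
def Spec_dist_matrix_creator (graph : List (String × List (String × Int))) (out : List (List (Option Int)) × (List (Int × String))) : Prop := out = dist_matrix_creator_alt graph
instance (graph : List (String × List (String × Int))) (out : List (List (Option Int)) × (List (Int × String))) : Decidable (Spec_dist_matrix_creator graph out) := by unfold Spec_dist_matrix_creator; infer_instance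

-- ===== CLAIM (what is proved, stated in full; the proofs are below) =====
def Claim_equal_dist_matrix_creator : Prop := ∀ (graph : List (String × List (String × Int))), Dom_dist_matrix_creator graph → Spec_dist_matrix_creator graph (dist_matrix_creator graph)

-- ===== LEMMAS AND PROOFS =====

-- Bool form of membership in Set.add for the two cases the row loop needs
theorem pvContains_add_self (s : PySem.Set Int) (x : Int) :
    PySem.Set.contains (PySem.Set.add s x) x = true := by
  exact (PySem.Set.contains_iff _ _).mpr ((PySem.Set.mem_add _ _ _).mpr (Or.inr rfl))

theorem pvContains_add_ne (s : PySem.Set Int) {x y : Int} (hxy : y ≠ x) :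
    PySem.Set.contains (PySem.Set.add s x) y = PySem.Set.contains s y := by
  rw [PySem.Set.add_eq_ite]
  split
  · rfl
  · simp [PySem.Set.contains_eq_listContains, hxy]

-- B's index dict: lookup of a key not in the list is untouched
theorem pvIdx_get_not_mem {xs : List String} {c : String} (h : c ∉ xs) :
    ∀ (s : Int) (acc : PySem.Dict String Int),
    ((PySem.List.enumerate xs s).foldl (fun a p => a.insert p.2 p.1) acc).get? c = acc.get? c := by
  induction xs with
  | nil => intro s acc; simp [PySem.List.enumerate_nil]
  | cons x xs ih =>
    intro s acc
    simp only [List.mem_cons, not_or] at h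
    rw [PySem.List.enumerate_cons]
    simp only [List.foldl_cons]
    rw [ih h.2]
    exact PySem.Dict.get?_insert_of_ne _ _ h.1

-- B's index dict: lookup of xs[i] is s + i (for nodup xs)
theorem pvIdx_get_mem {xs : List String} (hnd : xs.Nodup) :
    ∀ (i : Nat), ∀ (hi : i < xs.length), ∀ (s : Int) (acc : PySem.Dict String Int),
    ((PySem.List.enumerate xs s).foldl (fun a p => a.insert p.2 p.1) acc).get? xs[i] = some (s + i) := by
  induction xs with
  | nil => intro i hi; simp at hi
  | cons x xs ih =>
    intro i hi s acc
    rw [PySem.List.enumerate_cons]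
    simp only [List.foldl_cons]
    cases i with
    | zero =>
      simp only [List.getElem_cons_zero]
      rw [pvIdx_get_not_mem (List.nodup_cons.mp hnd).1]
      simp [PySem.Dict.get?_insert_self]
    | succ i =>
      simp only [List.getElem_cons_succ]
      rw [ih (List.nodup_cons.mp hnd).2 i (by simpa using hi) (s+1)]
      congr 1
      push_cast
      ring

theorem pvIdx_spec_none {cities : List String} {c : String} (h : c ∉ cities) :
    ((PySem.List.enumerate cities).foldl (fun a p => a.insert p.2 p.1) PySem.Dict.empty).get? c = none := by
  rw [show PySem.List.enumerate cities = PySem.List.enumerate cities 0 from rfl]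
  rw [pvIdx_get_not_mem h]
  simp [pysem]

theorem pvIdx_spec_some {cities : List String} (hnd : cities.Nodup) {i : Nat} (hi : i < cities.length) :
    ((PySem.List.enumerate cities).foldl (fun a p => a.insert p.2 p.1) PySem.Dict.empty).get? cities[i] = some i := by
  rw [show PySem.List.enumerate cities = PySem.List.enumerate cities 0 from rfl]
  rw [pvIdx_get_mem hnd i hi 0]
  simp

-- characterize any successful idx lookup
theorem pvIdx_some_inv {cities : List String} (hnd : cities.Nodup) {c : String} {k : Int}
    (h : ((PySem.List.enumerate cities).foldl (fun a p => a.insert p.2 p.1) PySem.Dict.empty).get? c = some k) :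
    ∃ (m : Nat) (hm : m < cities.length), cities[m] = c ∧ k = (m : Int) := by
  by_cases hc : c ∈ cities
  · obtain ⟨m, hm, rfl⟩ := List.getElem_of_mem hc
    refine ⟨m, hm, rfl, ?_⟩
    rw [pvIdx_spec_some hnd hm] at h
    exact (Option.some_injective _ h).symm
  · rw [pvIdx_spec_none hc] at h
    simp at h

theorem pvBRow_length (idx : PySem.Dict String Int) (edges : List (String × Int))
    (row : List (Option Int)) (assigned : PySem.Set Int) :
    (pvBRow idx edges row assigned).length = row.length := by
  induction edges generalizing row assigned with
  | nil => rfl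
  | cons e rest ih =>
    obtain ⟨dest, dist⟩ := e
    simp only [pvBRow]
    split
    · exact ih _ _
    · split
      · exact ih _ _
      · rw [ih, PySem.List.length_pySetD]

-- main row invariant: B's edge-driven fill agrees cellwise with A's per-cell scan
theorem pvBRow_inv {cities : List String} (hnd : cities.Nodup)
    {idx : PySem.Dict String Int}
    (hidx : idx = (PySem.List.enumerate cities).foldl (fun a p => a.insert p.2 p.1) PySem.Dict.empty)
    {j : Nat} (hj : j < cities.length) :
    ∀ (edges : List (String × Int)) (row : List (Option Int)) (assigned : PySem.Set Int),
    row.length = cities.length →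
    (pvBRow idx edges row assigned).getD j none =
      if PySem.Set.contains assigned (j : Int) then row.getD j none
      else pvAScan edges cities[j] (row.getD j none) := by
  intro edges
  induction edges with
  | nil => intro row assigned _; simp only [pvBRow, pvAScan]; split <;> rfl
  | cons e rest ih =>
    intro row assigned hlen
    obtain ⟨dest, dist⟩ := e
    cases hget : idx.get? dest with
    | none =>
      have hdest : dest ∉ cities := by
        intro hmem
        obtain ⟨m, hm, rfl⟩ := List.getElem_of_mem hmem
        rw [hidx, pvIdx_spec_some hnd hm] at hget
        simp at hget
      simp only [pvBRow, hget]
      rw [ih row assigned hlen]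
      have hne : (dest == cities[j]) = false := by
        simp only [beq_eq_false_iff_ne, ne_eq]
        intro h; exact hdest (h ▸ List.getElem_mem hj)
      simp only [pvAScan, hne, Bool.false_eq_true, if_false]
    | some k =>
      obtain ⟨m, hm, hcm, rfl⟩ := pvIdx_some_inv hnd (hidx ▸ hget)
      by_cases hjm : j = m
      · -- this edge's destination is exactly city j
        subst hjm
        have hdj : (dest == cities[j]) = true := by simp [hcm]
        by_cases hass : PySem.Set.contains assigned ((j : Nat) : Int) = true
        · simp only [pvBRow, hget, hass, if_true]
          rw [ih row assigned hlen, if_pos hass]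
        · have hlen' : (PySem.List.pySetD row ((j : Nat) : Int) (some dist)).length = cities.length := by
            rw [PySem.List.length_pySetD]; exact hlen
          simp only [pvBRow, hget, hass, Bool.false_eq_true, if_false]
          rw [ih _ _ hlen', if_pos (pvContains_add_self assigned _), PySem.List.pySetD_natCast]
          simp only [List.getD, List.getElem?_set_self']
          simp [pvAScan, hdj, hlen ▸ hj]
      · -- destination is some other city: cell j is untouched by this edge
        have hne : (dest == cities[j]) = false := by
          simp only [beq_eq_false_iff_ne, ne_eq]
          intro h
          exact hjm (hnd.getElem_inj_iff.mp (h.symm.trans hcm.symm))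
        have hjm' : ((j : Nat) : Int) ≠ ((m : Nat) : Int) := by exact_mod_cast hjm
        by_cases hass : PySem.Set.contains assigned ((m : Nat) : Int) = true
        · simp only [pvBRow, hget, hass, if_true]
          rw [ih row assigned hlen]
          simp [pvAScan, hne]
        · have hlen' : (PySem.List.pySetD row ((m : Nat) : Int) (some dist)).length = cities.length := by
            rw [PySem.List.length_pySetD]; exact hlen
          simp only [pvBRow, hget, hass, Bool.false_eq_true, if_false]
          rw [ih _ _ hlen', pvContains_add_ne assigned hjm']
          have hrow : (PySem.List.pySetD row ((m : Nat) : Int) (some dist)).getD j none = row.getD j none := by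
            rw [PySem.List.pySetD_natCast]
            simp only [List.getD]
            rw [List.getElem?_set_ne (by omega)]
          rw [hrow]
          simp [pvAScan, hne]

-- enumerate, elementwise
theorem pvGetElem?_enumerate' {α : Type} (xs : List α) :
    ∀ (s : Int) (k : Nat) (hk : k < xs.length),
    (PySem.List.enumerate xs s)[k]? = some (s + k, xs[k]) := by
  induction xs with
  | nil => intro s k hk; simp at hk
  | cons x xs ih =>
    intro s k hk
    rw [PySem.List.enumerate_cons]
    cases k with
    | zero => simp
    | succ k =>
      rw [List.getElem?_cons_succ, ih (s+1) k (by simpa using hk)]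
      simp only [List.getElem_cons_succ, Option.some.injEq, Prod.mk.injEq]
      constructor
      · push_cast; ring
      · exact trivial

theorem pvGetElem_enumerate {α : Type} (xs : List α) (s : Int) (k : Nat) (hk : k < xs.length) :
    (PySem.List.enumerate xs s)[k]'(by rw [PySem.List.length_enumerate]; exact hk) = (s + k, xs[k]) := by
  have h := pvGetElem?_enumerate' xs s k hk
  rw [List.getElem?_eq_getElem (by rw [PySem.List.length_enumerate]; exact hk)] at h
  exact Option.some_injective _ h

-- ===== VERDICT (by name: the statement is the Claim_ definition above) =====
theorem dist_matrix_creator_spec : Claim_equal_dist_matrix_creator := by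
  intro graph _
  unfold Spec_dist_matrix_creator dist_matrix_creator dist_matrix_creator_alt
  simp only []
  set d := PySem.Dict.ofList graph with hd
  set cities := d.keys with hcities
  have hnd : cities.Nodup := PySem.Dict.nodup_keys_ofList graph
  refine Prod.ext ?_ ?_
  · -- matrices agree
    apply List.ext_getElem
    · simp [PySem.List.length_enumerate]
    · intro i hi hi'
      rw [List.getElem_map, List.getElem_map]
      rw [pvGetElem_enumerate cities 0 i (by simpa [PySem.List.length_enumerate] using hi')]
      simp only [zero_add]
      apply List.ext_getElem
      · rw [pvBRow_length, PySem.List.length_pySetD, List.length_replicate, List.length_map]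
      · intro j hj hj'
        have hjc : j < cities.length := by simpa using hj
        have hic : i < cities.length := by simpa using hi
        rw [List.getElem_map]
        have hlen0 : (PySem.List.pySetD (List.replicate cities.length (none : Option Int)) ((i : Nat) : Int) (some 0)).length = cities.length := by
          rw [PySem.List.length_pySetD, List.length_replicate]
        have := pvBRow_inv hnd rfl hjc (d.getD cities[i] [])
          (PySem.List.pySetD (List.replicate cities.length (none : Option Int)) ((i : Nat) : Int) (some 0))
          (PySem.Set.add PySem.Set.empty (i : Int)) hlen0
        rw [← List.getD_eq_getElem _ none (by rw [pvBRow_length, hlen0]; exact hjc)] at *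
        rw [this]
        have hbase : (PySem.List.pySetD (List.replicate cities.length (none : Option Int)) ((i : Nat) : Int) (some 0)).getD j none
            = if j = i then some 0 else none := by
          rw [PySem.List.pySetD_natCast]
          simp only [List.getD]
          by_cases hji : j = i
          · subst hji; simp [List.getElem?_set_self', hjc]
          · have hij : i ≠ j := by omega
            simp [List.getElem?_set, hij, hji, hjc]
        by_cases hji : j = i
        · subst hji
          rw [if_pos (pvContains_add_self _ _), hbase]
          simp
        · have hji' : ((j : Nat) : Int) ≠ ((i : Nat) : Int) := by exact_mod_cast hji
          rw [pvContains_add_ne _ hji']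
          have hcemp : PySem.Set.contains PySem.Set.empty ((j : Nat) : Int) = false := by
            simp [PySem.Set.contains_eq_listContains, PySem.Set.empty]
          rw [hcemp]
          have hne : (cities[i] == cities[j]) = false := by
            simp only [beq_eq_false_iff_ne, ne_eq]
            intro h
            exact hji (hnd.getElem_inj_iff.mp h.symm)
          simp [hbase, hne, hji]
          have hij : i ≠ j := by omega
          simp [List.getElem?_set, hij, hji, hjc]
  · -- index dicts agree
    dsimp only
    have hA : (List.foldl (fun acc i => acc.insert i (PySem.List.pyGetD cities i "")) PySem.Dict.empty
          (PySem.List.pyRange 0 (cities.length : Int) 1)).items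
        = PySem.Dict.empty.items ++ (PySem.List.pyRange 0 (cities.length : Int) 1).map
            (fun a => (a, PySem.List.pyGetD cities a "")) :=
      PySem.Dict.items_foldl_insert_fresh _ _ _ _
        (by intro a _; exact PySem.Dict.contains_empty a)
        (by simpa using PySem.List.nodup_pyRange_one 0 (cities.length : Int))
    have hB : (List.foldl (fun acc p => acc.insert p.1 p.2) PySem.Dict.empty
          (PySem.List.enumerate cities)).items
        = PySem.Dict.empty.items ++ (PySem.List.enumerate cities).map (fun p => (p.1, p.2)) :=
      PySem.Dict.items_foldl_insert_fresh _ _ _ _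
        (by intro a _; exact PySem.Dict.contains_empty a.1)
        (by rw [PySem.List.map_fst_enumerate]; simpa using PySem.List.nodup_pyRange_one 0 (0 + (cities.length : Int)))
    rw [hA, hB]
    simp only [show (PySem.Dict.empty : PySem.Dict Int String).items = [] from rfl, List.nil_append]
    apply List.ext_getElem
    · simp [PySem.List.length_pyRange_one, PySem.List.length_enumerate]
    · intro k hk hk'
      have hkc : k < cities.length := by
        simpa [PySem.List.length_pyRange_one] using hk
      rw [List.getElem_map, List.getElem_map]
      rw [pvGetElem_enumerate cities 0 k hkc]
      rw [PySem.List.getElem_pyRange_one]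
      simp only [zero_add]
      refine Prod.ext (by simp) ?_
      simp only []
      rw [PySem.List.pyGetD_natCast]
      simp [List.getD, List.getElem?_eq_getElem hkc]
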